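-- pv_equiv track=rewrite | github.com/nandhakumar-natarajan/nuanz-insights | download_hdfc_monthly_json.py | normalize_month_input
-- ===== SOURCE A (Python) =====
-- def normalize_month_input(month):
--     m = month.strip().lower()
--     months = {
--         'january':'January','february':'February','march':'March','april':'April','may':'May','june':'June',
--         'july':'July','august':'August','september':'September','october':'October','november':'November','december':'December'
--     }
--     if m in months:
--         return months[m]
--     # accept short forms
--     short_map = {k[:3]:v for k,v in months.items()}
--     if m[:3] in short_map:
--         return short_map[m[:3]]
--     raise ValueError('Unknown month: %s' % month)
-- ===== SOURCE B (Python) =====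
-- # Binary search over abbreviations sorted lexicographically.
-- _SORTED = (('apr', 'April'), ('aug', 'August'), ('dec', 'December'),
--            ('feb', 'February'), ('jan', 'January'), ('jul', 'July'),
--            ('jun', 'June'), ('mar', 'March'), ('may', 'May'),
--            ('nov', 'November'), ('oct', 'October'), ('sep', 'September'))
--
--
-- def normalize_month_input(month):
--     key = month.strip().lower()[:3]
--     lo, hi = 0, len(_SORTED)
--     while lo < hi:
--         mid = (lo + hi) // 2
--         if _SORTED[mid][0] < key:
--             lo = mid + 1
--         else:
--             hi = mid
--     if lo < len(_SORTED) and _SORTED[lo][0] == key: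
--         return _SORTED[lo][1]
--     raise ValueError('Unknown month: %s' % month)
-- ===== Notes on version B (the rewrite author's own statement) =====
-- stated objective: alternative
-- what changed: Replaces A's two hash-dict lookups (full-name map plus a comprehension-built 3-letter short map) by a hand-written binary search of the lowercased 3-letter prefix over a statically sorted table of (abbreviation, canonical name) pairs; the full-name check is subsumed because every full name shares its abbreviation's mapping.
import Mathlib
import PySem

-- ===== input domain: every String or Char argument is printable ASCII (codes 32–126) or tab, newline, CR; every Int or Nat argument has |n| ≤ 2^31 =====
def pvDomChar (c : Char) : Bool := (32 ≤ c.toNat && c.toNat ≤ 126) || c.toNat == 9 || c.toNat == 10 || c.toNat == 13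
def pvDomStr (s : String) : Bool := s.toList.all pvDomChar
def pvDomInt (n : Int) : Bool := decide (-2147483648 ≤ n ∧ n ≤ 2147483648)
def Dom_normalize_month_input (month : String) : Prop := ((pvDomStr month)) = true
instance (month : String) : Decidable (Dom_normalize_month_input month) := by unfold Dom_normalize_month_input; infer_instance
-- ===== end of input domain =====

-- B replaces A's two dict lookups by a binary search of the lowercased 3-letter prefix over a
-- statically sorted abbreviation table (alternative algorithm; equal on all inputs where A returns).

-- ===== PORT A =====
def pvMonthsDict : PySem.Dict String String := PySem.Dict.ofList
  [("january","January"),("february","February"),("march","March"),("april","April"),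
   ("may","May"),("june","June"),("july","July"),("august","August"),
   ("september","September"),("october","October"),("november","November"),("december","December")]

def normalize_month_input (month : String) : String :=
  let m := PySem.Str.lower (PySem.Str.strip month)
  if pvMonthsDict.contains m then pvMonthsDict.getD m ""
  else
    let short_map := pvMonthsDict.items.foldl
      (fun d kv => PySem.Dict.insert d (PySem.Str.slice kv.1 none (some 3)) kv.2) PySem.Dict.empty
    let m3 := PySem.Str.slice m none (some 3)
    if short_map.contains m3 then short_map.getD m3 ""
    else ""   -- Python raises ValueError here: excluded by Pre_

-- ===== PORT B =====
def pvSorted : List (String × String) :=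
  [("apr","April"),("aug","August"),("dec","December"),("feb","February"),
   ("jan","January"),("jul","July"),("jun","June"),("mar","March"),
   ("may","May"),("nov","November"),("oct","October"),("sep","September")]

-- Python's str '<' : lexicographic by code point (exact on all strings); hand-ported because
-- Lean's String '<' instance does not kernel-reduce
def pvCharsLt : List Char → List Char → Bool
  | _, [] => false
  | [], _ :: _ => true
  | a :: as, b :: bs =>
    if a.toNat < b.toNat then true
    else if b.toNat < a.toNat then false
    else pvCharsLt as bs

def pvStrLt (a b : String) : Bool := pvCharsLt a.toList b.toList

-- the while-loop of Source B; structural recursion on fuel = hi - lo (each iteration shrinks the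
-- interval by at least one, so the fuel never runs out before lo = hi)
def pvBisectGo (key : String) : Nat → Nat → Nat → Nat
  | 0, lo, _ => lo
  | fuel + 1, lo, hi =>
    if lo < hi then
      let mid := (lo + hi) / 2
      if pvStrLt (pvSorted.getD mid ("","")).1 key then pvBisectGo key fuel (mid + 1) hi
      else pvBisectGo key fuel lo mid
    else lo

def pvBisect (key : String) (lo hi : Nat) : Nat := pvBisectGo key (hi - lo) lo hi

def normalize_month_input_alt (month : String) : String :=
  let key := PySem.Str.slice (PySem.Str.lower (PySem.Str.strip month)) none (some 3)
  let lo := pvBisect key 0 pvSorted.length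
  if lo < pvSorted.length ∧ (pvSorted.getD lo ("","")).1 == key then
    (pvSorted.getD lo ("","")).2
  else ""   -- Python raises ValueError here: excluded by Pre_

-- ===== PRECONDITION & SPEC =====
-- Pre_ excludes exactly the inputs on which A raises ValueError: those whose stripped, lowercased
-- first three characters are not the abbreviation of a month name.
def Pre_normalize_month_input (month : String) : Prop :=
  PySem.Str.slice (PySem.Str.lower (PySem.Str.strip month)) none (some 3) ∈
    ["jan","feb","mar","apr","may","jun","jul","aug","sep","oct","nov","dec"]
instance (month : String) : Decidable (Pre_normalize_month_input month) := by
  unfold Pre_normalize_month_input; infer_instance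

def pvWitness_normalize_month_input : String := " May "

def Spec_normalize_month_input (month : String) (out : String) : Prop := out = normalize_month_input_alt month
instance (month : String) (out : String) : Decidable (Spec_normalize_month_input month out) := by unfold Spec_normalize_month_input; infer_instance

-- ===== CLAIM =====
def Claim_equal_normalize_month_input : Prop := ∀ (month : String), Dom_normalize_month_input month → Pre_normalize_month_input month → Spec_normalize_month_input month (normalize_month_input month)

-- ===== LEMMAS AND PROOFS =====

-- Both ports depend on the input only through m = lower (strip month); this is the core equality.
theorem pv_core (m : String)
    (hpre : PySem.Str.slice m none (some 3) ∈
      ["jan","feb","mar","apr","may","jun","jul","aug","sep","oct","nov","dec"]) :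
    (if pvMonthsDict.contains m then pvMonthsDict.getD m ""
     else
       let short_map := pvMonthsDict.items.foldl
         (fun d kv => PySem.Dict.insert d (PySem.Str.slice kv.1 none (some 3)) kv.2) PySem.Dict.empty
       let m3 := PySem.Str.slice m none (some 3)
       if short_map.contains m3 then short_map.getD m3 "" else "")
    = (let key := PySem.Str.slice m none (some 3)
       let lo := pvBisect key 0 pvSorted.length
       if lo < pvSorted.length ∧ (pvSorted.getD lo ("","")).1 == key then
         (pvSorted.getD lo ("","")).2
       else "") := by
  by_cases hc : pvMonthsDict.contains m = true
  · have hk : m ∈ pvMonthsDict.keys := (PySem.Dict.contains_iff_mem_keys _ _).mp hc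
    simp only [pvMonthsDict, PySem.Dict.ofList] at hk
    fin_cases hk <;> decide
  · simp only [hc, if_false, Bool.false_eq_true]
    simp only [List.mem_cons, List.not_mem_nil, or_false] at hpre
    rcases hpre with h|h|h|h|h|h|h|h|h|h|h|h <;> rw [h] <;> decide

-- ===== VERDICT =====
theorem normalize_month_input_spec : Claim_equal_normalize_month_input := by
  intro month _ hpre
  unfold Spec_normalize_month_input normalize_month_input normalize_month_input_alt
  exact pv_core _ hpre
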